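-- pv_equiv track=rewrite | github.com/IvanKalug-QA/codewars | Reverse_and_Invert.py | reverse_invert
-- ===== SOURCE A (Python) =====
-- def reverse_invert(lst):
--     result = []
--     for i in lst:
--         if isinstance(i, int):
--             if i < 0:
--                 result.append(int(str(abs(i))[::-1]))
--             else:
--                 result.append(-int(str(abs(i))[::-1]))
--     return result
-- ===== SOURCE B (Python) =====
-- def reverse_invert(lst):
--     # Reverse each int's digits arithmetically (no str/slice/int round-trip)
--     # and negate: non-negative inputs give the negated reversed value,
--     # negative inputs the positive reversed magnitude.
--     return [-_rev(i) if i >= 0 else _rev(i) for i in lst if isinstance(i, int)]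
--
--
-- def _rev(i):
--     n = abs(i)
--     rev = 0
--     while n > 0:
--         rev = rev * 10 + n % 10
--         n //= 10
--     return rev
-- ===== Notes on version B (the rewrite author's own statement) =====
-- stated objective: alternative
-- what changed: B computes each reversed magnitude with an arithmetic loop (rev = rev*10 + n%10; n //= 10) inside a list comprehension instead of A's str(abs(i))[::-1]/int string round-trip with explicit appends.
import Mathlib
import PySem

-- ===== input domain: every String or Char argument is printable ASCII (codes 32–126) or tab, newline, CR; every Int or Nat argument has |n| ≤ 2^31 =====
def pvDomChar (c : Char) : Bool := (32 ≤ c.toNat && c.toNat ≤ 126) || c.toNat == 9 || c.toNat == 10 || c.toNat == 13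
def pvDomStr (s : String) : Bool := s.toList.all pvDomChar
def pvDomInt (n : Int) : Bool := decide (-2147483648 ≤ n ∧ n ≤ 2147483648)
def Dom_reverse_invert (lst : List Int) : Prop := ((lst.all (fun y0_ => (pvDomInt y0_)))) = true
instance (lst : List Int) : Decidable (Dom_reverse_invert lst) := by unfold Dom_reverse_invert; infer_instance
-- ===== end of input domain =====

-- B replaces A's str(abs(i))[::-1]/int round-trip by an arithmetic digit-reversal loop inside a comprehension (alternative algorithm, same results).


-- ===== PORT A =====
-- int(str(abs(i))[::-1]): the slice of a string never raises and int() of the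
-- reversed decimal digits of abs(i) never raises, so the two `none` defaults
-- (.getD 0 and the slice? bind) are unreachable.
def pvAInt (i : Int) : Int :=
  ((PySem.Str.slice? (PySem.Int.toStr |i|) none none (-1)).bind PySem.Int.ofStr?).getD 0

-- `isinstance(i, int)` is always true for elements of a List Int, so the filter keeps every element.
def reverse_invert (lst : List Int) : List Int :=
  lst.foldl (fun result i =>
    if i < 0 then result ++ [pvAInt i]
    else result ++ [-pvAInt i]) []

-- ===== PORT B =====
-- while n > 0: rev = rev * 10 + n % 10; n //= 10
def pvRevLoop (n rev : Int) : Int :=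
  if h : 0 < n then pvRevLoop (PySem.Int.floordiv n 10) (rev * 10 + PySem.Int.mod n 10) else rev
  termination_by n.toNat
  decreasing_by
    rw [PySem.Int.floordiv_eq_ediv_of_pos (by omega)]
    have h1 : n / 10 < n := (Int.ediv_lt_iff_lt_mul (by omega)).mpr (by omega)
    have h0 : 0 ≤ n / 10 := Int.ediv_nonneg (by omega) (by omega)
    omega

-- _rev(i): n = abs(i); rev = 0; while loop
def pvRev (i : Int) : Int := pvRevLoop |i| 0

-- [-_rev(i) if i >= 0 else _rev(i) for i in lst if isinstance(i, int)]
-- (the isinstance filter keeps every element of a List Int)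
def reverse_invert_alt (lst : List Int) : List Int :=
  lst.map (fun i => if 0 ≤ i then -pvRev i else pvRev i)

-- ===== PRECONDITION & SPEC =====
def Spec_reverse_invert (lst : List Int) (out : List Int) : Prop := out = reverse_invert_alt lst
instance (lst : List Int) (out : List Int) : Decidable (Spec_reverse_invert lst out) := by unfold Spec_reverse_invert; infer_instance

-- ===== CLAIM (what is proved, stated in full; the proofs are below) =====
def Claim_equal_reverse_invert : Prop := ∀ (lst : List Int), Dom_reverse_invert lst → Spec_reverse_invert lst (reverse_invert lst)

-- ===== LEMMAS AND PROOFS =====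

-- ---- a transparent model of PySem's private int() digit parser ----
-- PySem.Int.ofChars?'s digit loop is a private definition, so we re-state it
-- here verbatim (proof-side model only; the ports use PySem.Int.ofStr?) and
-- prove `ofChars?_model` below connecting the two.
def pvGoModel : List Char → Bool → Nat → Option Nat
  | [], afterDigit, acc => if afterDigit = true then some acc else none
  | c :: rest, afterDigit, acc =>
    if c.isDigit = true then pvGoModel rest true (acc * 10 + (c.toNat - '0'.toNat))
    else
      if c = '_' ∧ afterDigit = true then
        match rest with
        | d :: _ => if d.isDigit = true then pvGoModel rest false acc else none
        | [] => none
      else none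

def pvDigitsValModel (x : List Char) : Option Nat :=
  match x with
  | [] => none
  | cs => pvGoModel cs false 0

def pvOfCharsCore (cs : List Char) : Option Int :=
  PySem.Int.ofChars?.match_1 (fun _ => Option Int) cs
    (fun ds => Option.map (fun n => -n) (do let a ← pvDigitsValModel ds; pure ((a : Int))))
    (fun ds => Option.map (fun n => n) (do let a ← pvDigitsValModel ds; pure ((a : Int))))
    (fun ds => Option.map (fun n => n) (do let a ← pvDigitsValModel ds; pure ((a : Int))))

def pvOfCharsModel (s : List Char) : Option Int :=
  pvOfCharsCore (List.dropWhile PySem.Int.isIntSpace (List.dropWhile PySem.Int.isIntSpace s).reverse).reverse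

theorem pvGoModel_anchor (G : List Char → Bool → Nat → Option Nat)
    (hnil : ∀ b acc, G [] b acc = if b = true then some acc else none)
    (hcons : ∀ c rest b acc, G (c :: rest) b acc =
        if c.isDigit = true then G rest true (acc * 10 + (c.toNat - '0'.toNat))
        else
          if c = '_' ∧ b = true then
            match rest with
            | d :: _ => if d.isDigit = true then G rest false acc else none
            | [] => none
          else none) :
    ∀ (l : List Char) (b : Bool) (acc : Nat), G l b acc = pvGoModel l b acc := by
  intro l
  induction l with
  | nil => intro b acc; rw [hnil]; rfl
  | cons c t ih => intro b acc; rw [hcons]; simp only [pvGoModel, ih]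

theorem pvDV_anchor (DV : List Char → Option Nat) (cs : List Char)
    (hDV : ∀ ds, DV ds = pvDigitsValModel ds) :
    PySem.Int.ofChars?.match_1 (fun _ => Option Int) cs
      (fun ds => Option.map (fun n => -n) (do let a ← DV ds; pure ((a : Int))))
      (fun ds => Option.map (fun n => n) (do let a ← DV ds; pure ((a : Int))))
      (fun ds => Option.map (fun n => n) (do let a ← DV ds; pure ((a : Int))))
    = pvOfCharsCore cs := by
  simp only [hDV]; rfl

theorem ofChars?_model (s : List Char) : PySem.Int.ofChars? s = pvOfCharsModel s := by
  unfold PySem.Int.ofChars? pvOfCharsModel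
  refine pvDV_anchor ?DV _ ?hdv
  intro ds
  cases ds with
  | nil => rfl
  | cons c t =>
    have hrhs : pvDigitsValModel (c :: t) = pvGoModel (c :: t) false 0 := rfl
    rw [hrhs]
    conv_lhs => whnf
    cases hD : instDecidableEqBool c.isDigit true with
    | isTrue p =>
      simp only [pvGoModel, p, if_true]
      refine pvGoModel_anchor ?G ?h1 ?h2 t true _
      case h1 => intro b acc; rfl
      case h2 => intro c' rest b acc; rfl
    | isFalse p =>
      simp [pvGoModel, p]

-- ---- evaluating the model on a nonempty list of decimal digits ----

def pvStep (a : Nat) (c : Char) : Nat := a * 10 + (c.toNat - '0'.toNat)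

theorem pvGoModel_digits (cs : List Char) (h : ∀ c ∈ cs, c.isDigit = true) :
    ∀ acc, pvGoModel cs true acc = some (cs.foldl pvStep acc) := by
  induction cs with
  | nil => intro acc; rfl
  | cons c t ih =>
    intro acc
    have hc : c.isDigit = true := h c (by simp)
    simp only [pvGoModel, hc, if_true, List.foldl]
    exact ih (fun d hd => h d (by simp [hd])) _

theorem pvGoModel_digits_start (c : Char) (t : List Char)
    (h : ∀ d ∈ c :: t, d.isDigit = true) :
    pvGoModel (c :: t) false 0 = some ((c :: t).foldl pvStep 0) := by
  have hc : c.isDigit = true := h c (by simp)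
  simp only [pvGoModel, hc, if_true, List.foldl]
  exact pvGoModel_digits t (fun d hd => h d (by simp [hd])) _

theorem pvDigit_toNat (c : Char) (h : c.isDigit = true) : 48 ≤ c.toNat ∧ c.toNat ≤ 57 := by
  simp [Char.isDigit] at h; exact ⟨h.1, h.2⟩

theorem pvDigit_not_space (c : Char) (h : c.isDigit = true) : PySem.Int.isIntSpace c = false := by
  have hb := pvDigit_toNat c h
  simp only [PySem.Int.isIntSpace, Bool.or_eq_false_iff, decide_eq_false_iff_not]
  refine ⟨⟨⟨⟨⟨?_, ?_⟩, ?_⟩, ?_⟩, ?_⟩, ?_⟩ <;> (rintro rfl; exact absurd hb (by decide))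

theorem pvDropWhile_digits (l : List Char) (h : ∀ d ∈ l, d.isDigit = true) :
    List.dropWhile PySem.Int.isIntSpace l = l := by
  cases l with
  | nil => rfl
  | cons c t =>
    apply List.dropWhile_cons_of_neg
    simp [pvDigit_not_space c (h c (by simp))]

theorem pvMatch1_cons {motive : List Char → Sort u} (c : Char) (t : List Char)
    (f : (ds : List Char) → motive ('-' :: ds)) (g : (ds : List Char) → motive ('+' :: ds))
    (h : (ds : List Char) → motive ds) (h1 : c ≠ '-') (h2 : c ≠ '+') :
    PySem.Int.ofChars?.match_1 motive (c :: t) f g h = h (c :: t) := by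
  delta PySem.Int.ofChars?.match_1
  delta PySem.Int.ofChars?._sparseCasesOn_1
  simp only []
  rw [dif_neg h1, dif_neg h2]

theorem pvOfChars_digits (c : Char) (t : List Char)
    (h : ∀ d ∈ c :: t, d.isDigit = true) :
    PySem.Int.ofChars? (c :: t) = some (((c :: t).foldl pvStep 0 : Nat) : Int) := by
  rw [ofChars?_model]
  unfold pvOfCharsModel
  rw [pvDropWhile_digits _ h]
  rw [pvDropWhile_digits _ (by intro d hd; exact h d (List.mem_reverse.mp hd))]
  rw [List.reverse_reverse]
  have hc1 : c ≠ '-' := by rintro rfl; exact absurd (pvDigit_toNat _ (h '-' (by simp))) (by decide)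
  have hc2 : c ≠ '+' := by rintro rfl; exact absurd (pvDigit_toNat _ (h '+' (by simp))) (by decide)
  unfold pvOfCharsCore
  rw [pvMatch1_cons _ _ _ _ _ hc1 hc2]
  have hdv : pvDigitsValModel (c :: t) = pvGoModel (c :: t) false 0 := rfl
  rw [hdv, pvGoModel_digits_start c t h]
  rfl

-- ---- the arithmetic reversal on Nat and its two characterisations ----

def pvNatRev (m acc : Nat) : Nat :=
  if m = 0 then acc else pvNatRev (m / 10) (acc * 10 + m % 10)
  termination_by m
  decreasing_by exact Nat.div_lt_self (by omega) (by omega)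

theorem pvRevLoop_natCast (m : Nat) : ∀ acc : Nat, pvRevLoop (m : Int) (acc : Int) = (pvNatRev m acc : Int) := by
  induction m using Nat.strong_induction_on with
  | _ m ih =>
    intro acc
    rw [pvRevLoop, pvNatRev]
    by_cases hm : m = 0
    · subst hm; norm_num
    · rw [dif_pos (by exact_mod_cast Nat.pos_of_ne_zero hm), if_neg hm]
      rw [PySem.Int.floordiv_eq_ediv_of_pos (by norm_num), PySem.Int.mod_eq_emod_of_pos (by norm_num)]
      have e1 : (m : Int) / 10 = ((m / 10 : Nat) : Int) := by omega
      have e2 : (acc : Int) * 10 + (m : Int) % 10 = ((acc * 10 + m % 10 : Nat) : Int) := by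
        push_cast; omega
      rw [e1, e2]
      exact ih (m / 10) (Nat.div_lt_self (Nat.pos_of_ne_zero hm) (by omega)) _

theorem pvDigitChar_toNat (d : Nat) (h : d < 10) : (Nat.digitChar d).toNat = d + 48 := by
  interval_cases d <;> decide

theorem pvFoldl_toDigits (m : Nat) (hm : 0 < m) :
    ∀ acc, ((Nat.toDigits 10 m).reverse).foldl pvStep acc = pvNatRev m acc := by
  induction m using Nat.strong_induction_on with
  | _ m ih =>
    intro acc
    by_cases h10 : m < 10
    · rw [Nat.toDigits_of_lt_base h10]
      simp only [List.reverse_singleton, List.foldl, pvStep, pvDigitChar_toNat m h10]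
      rw [pvNatRev, if_neg (by omega), pvNatRev]
      simp [Nat.div_eq_of_lt h10, Nat.mod_eq_of_lt h10]
    · rw [Nat.toDigits_of_base_le (by norm_num) (by omega)]
      simp only [List.reverse_append, List.reverse_singleton, List.singleton_append, List.foldl]
      have hstep : pvStep acc (m % 10).digitChar = acc * 10 + m % 10 := by
        simp [pvStep, pvDigitChar_toNat (m % 10) (Nat.mod_lt _ (by omega))]
      rw [hstep, ih (m / 10) (Nat.div_lt_self hm (by omega)) (Nat.div_pos (by omega) (by omega)) _]
      conv_rhs => rw [pvNatRev]
      rw [if_neg (by omega)]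

-- ---- the per-element equality ----

theorem pvToDigits_ne_nil (m : Nat) : Nat.toDigits 10 m ≠ [] := by
  by_cases h10 : m < 10
  · rw [Nat.toDigits_of_lt_base h10]; simp
  · rw [Nat.toDigits_of_base_le (by norm_num) (by omega)]; simp

theorem pvAInt_eq (i : Int) : pvAInt i = pvRev i := by
  unfold pvAInt pvRev
  rw [Int.abs_eq_natAbs]
  by_cases hm : i.natAbs = 0
  · rw [hm, pvRevLoop]
    norm_num
    decide
  · rw [PySem.Str.slice?_none_none_neg_one]
    have htc : (PySem.Int.toStr (i.natAbs : Int)).toList = Nat.toDigits 10 i.natAbs := by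
      rw [PySem.Int.toList_toStr]
      simp only [PySem.Int.toChars]
      rw [if_neg (show ¬((i.natAbs : Int) < 0) by omega), Int.toNat_natCast]
    rw [Option.bind_some, PySem.Int.ofStr?_ofList, htc]
    cases hE : (Nat.toDigits 10 i.natAbs).reverse with
    | nil => exact absurd (by simpa using congrArg List.reverse hE) (pvToDigits_ne_nil i.natAbs)
    | cons c t =>
      have hdig : ∀ d ∈ c :: t, d.isDigit = true := by
        intro d hd
        rw [← hE] at hd
        exact Nat.isDigit_of_mem_toDigits (by norm_num) (le_refl 10) (List.mem_reverse.mp hd)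
      rw [pvOfChars_digits c t hdig, Option.getD_some, ← hE,
        pvFoldl_toDigits i.natAbs (Nat.pos_of_ne_zero hm) 0]
      have h0 : (0 : Int) = ((0 : Nat) : Int) := rfl
      rw [h0, pvRevLoop_natCast]

-- ===== VERDICT (by name: the statement is the Claim_ definition above) =====
theorem reverse_invert_spec : Claim_equal_reverse_invert := by
  intro lst _
  unfold Spec_reverse_invert reverse_invert reverse_invert_alt
  have hfun : (fun (result : List Int) (i : Int) =>
      if i < 0 then result ++ [pvAInt i] else result ++ [-pvAInt i])
      = fun result i => result ++ [if 0 ≤ i then -pvRev i else pvRev i] := by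
    funext result i
    by_cases h : i < 0
    · simp [h, pvAInt_eq, show ¬(0 ≤ i) by omega]
    · simp [h, pvAInt_eq, show (0 ≤ i) by omega]
  rw [hfun, PySem.List.foldl_append_singleton_eq_map]
  simp
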